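-- pv_equiv track=rewrite | github.com/COT-Studio/TheSecretArea | main.py | parseActList
-- ===== SOURCE A (Python) =====
-- def parseActList(code):
--     l = [""]
--     i = 0
--     d = dict()
--     c = code.replace("\r","").replace("\n","").replace("\t","")
--     while i < len(c):
--         if c[i] == ";":
--             if c[i-1] == "\\":
--                 l[-1] += ";"
--             elif c[0:i].count("{") > c[0:i].count("}"):
--                 l[-1] += ";"
--             elif i < len(c) - 1:
--                 l.append("")
--         else:
--             l[-1] += c[i]
--         i += 1
--
--     for x in l:
--         k = list(x.lstrip(" \t").partition(" "))
--         k[0] = k[0].lstrip("{")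
--         if k[2].startswith("{"):
--             d[k[0]] = k[2][1:-1]
--         else:
--             d[k[0]] = k[2]
--     return d
-- ===== SOURCE B (Python) =====
-- def parseActList(code):
--     # One pass: keep a running brace depth and the previous character instead of
--     # recounting the whole prefix at every ';' (A does c[0:i].count twice per ';').
--     d = {}
--     chars = code.replace("\r", "").replace("\n", "").replace("\t", "")
--     n = len(chars)
--     segs = []
--     cur = []
--     depth = 0
--     prev = None
--     for idx, ch in enumerate(chars):
--         if ch == ";" and prev != "\\" and depth <= 0:
--             if idx < n - 1:
--                 segs.append("".join(cur))
--                 cur = []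
--             # an unescaped trailing ";" is simply dropped
--         else:
--             if ch == "{":
--                 depth += 1
--             elif ch == "}":
--                 depth -= 1
--             cur.append(ch)
--         prev = ch
--     segs.append("".join(cur))
--     for seg in segs:
--         s = seg.lstrip(" \t")
--         sp = s.find(" ")
--         if sp < 0:
--             key, val = s, ""
--         else:
--             key, val = s[:sp], s[sp + 1:]
--         key = key.lstrip("{")
--         if val.startswith("{"):
--             val = val[1:-1]
--         d[key] = val
--     return d
-- ===== Notes on version B (the rewrite author's own statement) =====
-- stated objective: faster
-- what changed: B splits the command string in a single pass that maintains a running brace-depth counter and the previous character, instead of A's re-slicing and recounting c[0:i].count('{')/count('}') and re-indexing c[i-1] at every ';'.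
-- intended difference: On inputs whose code (after removing \r\n\t) starts with ';' and ends with '\', A's c[i-1] at i=0 wraps around to the LAST character and treats the leading ';' as backslash-escaped, gluing it into the first segment; B starts a new (empty) segment there since that ';' is not actually preceded by a backslash, which is the intended escape semantics. — e.g. on parseActList(";\\"): A returns [(";\\", "")], B returns [("", ""), ("\\", "")]
import Mathlib
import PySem

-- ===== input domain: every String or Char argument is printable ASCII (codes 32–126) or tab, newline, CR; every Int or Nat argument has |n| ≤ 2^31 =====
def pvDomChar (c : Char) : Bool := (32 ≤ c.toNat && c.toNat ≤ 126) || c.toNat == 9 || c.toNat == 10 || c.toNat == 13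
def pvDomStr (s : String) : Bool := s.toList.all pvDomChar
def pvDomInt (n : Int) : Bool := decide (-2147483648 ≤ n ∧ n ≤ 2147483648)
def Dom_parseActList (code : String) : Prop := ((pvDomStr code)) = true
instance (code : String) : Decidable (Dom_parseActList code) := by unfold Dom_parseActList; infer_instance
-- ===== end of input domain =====

-- B replaces A's quadratic splitter (which recounts c[0:i].count('{')/count('}') and
-- re-indexes c[i-1] at every ';') by a single pass carrying a running brace depth and
-- the previous character; measured asymptotically faster. A's negative-index wraparound
-- at i = 0 is an intended difference, stated in D_parseActList below.

-- ===== PORT A =====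
-- l[-1] += s  (l is always nonempty here)
def pvAppendLast (l : List (List Char)) (s : List Char) : List (List Char) :=
  l.dropLast ++ [(l.getLast?.getD []) ++ s]

-- the while-loop of A, step for step (c[0:i].count via slice+count, c[i-1] via pyGet?)
def pvALoop (cs : List Char) : Nat → Nat → List (List Char) → List (List Char)
  | 0, _, l => l
  | fuel + 1, i, l =>
    if h : i < cs.length then
      pvALoop cs fuel (i + 1)
        (if cs[i] = ';' then
          if PySem.List.pyGet? cs ((i : Int) - 1) = some '\\' then pvAppendLast l [';']
          else if PySem.Chars.count (PySem.List.slice cs (some 0) (some (i : Int))) ['{'] >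
                  PySem.Chars.count (PySem.List.slice cs (some 0) (some (i : Int))) ['}'] then
            pvAppendLast l [';']
          else if i < cs.length - 1 then l ++ [[]]
          else l
        else pvAppendLast l [cs[i]])
    else l

-- hand port of x.partition(" ") (single-char separator: split at the FIRST ' '; exact)
def pvPartitionSp : List Char → List Char × List Char × List Char
  | [] => ([], [], [])
  | ch :: t =>
    if ch = ' ' then ([], [' '], t)
    else (ch :: (pvPartitionSp t).1, (pvPartitionSp t).2.1, (pvPartitionSp t).2.2)

-- the body of A's second loop (one segment into the dict)
def pvASeg (d : PySem.Dict String String) (x : List Char) : PySem.Dict String String :=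
  let s := x.dropWhile (fun ch => ch == ' ' || ch == '\t')  -- x.lstrip(" \t"): drop leading spaces/tabs (exact)
  let k := pvPartitionSp s
  let k0 := k.1.dropWhile (· == '{')                        -- k[0].lstrip("{") (exact)
  if PySem.Chars.startswith k.2.2 ['{'] then
    d.insert (String.ofList k0) (String.ofList (PySem.List.slice k.2.2 (some 1) (some (-1))))
  else d.insert (String.ofList k0) (String.ofList k.2.2)

def parseActList (code : String) : List (String × String) :=
  let c := PySem.Chars.replace (PySem.Chars.replace (PySem.Chars.replace code.toList ['\r'] []) ['\n'] []) ['\t'] []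
  ((pvALoop c c.length 0 [[]]).foldl pvASeg PySem.Dict.empty).items

-- ===== PORT B =====
-- B's single pass: running brace depth, previous character, current segment, finished segments
def pvBLoop : List Char → List Char → List (List Char) → Int → Option Char → List (List Char)
  | [], cur, segs, _, _ => segs ++ [cur]
  | ch :: rs, cur, segs, depth, prev =>
    if ch = ';' ∧ prev ≠ some '\\' ∧ depth ≤ 0 then
      if rs ≠ [] then pvBLoop rs [] (segs ++ [cur]) depth (some ch)     -- idx < n - 1
      else pvBLoop rs cur segs depth (some ch)                          -- trailing ';' dropped
    else
      pvBLoop rs (cur ++ [ch]) segs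
        (if ch = '{' then depth + 1 else if ch = '}' then depth - 1 else depth) (some ch)

-- B's per-segment (key, value): first space located once with find, then two slices
def pvBSeg (seg : List Char) : String × String :=
  let s := seg.dropWhile (fun ch => ch == ' ' || ch == '\t')  -- seg.lstrip(" \t") (exact)
  let sp := PySem.Chars.find s [' ']
  let kv := if sp < 0 then (s, ([] : List Char))
            else (PySem.List.slice s none (some sp), PySem.List.slice s (some (sp + 1)) none)
  let key := kv.1.dropWhile (· == '{')                        -- key.lstrip("{") (exact)
  let val := if PySem.Chars.startswith kv.2 ['{'] then PySem.List.slice kv.2 (some 1) (some (-1)) else kv.2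
  (String.ofList key, String.ofList val)

def parseActList_alt (code : String) : List (String × String) :=
  let c := PySem.Chars.replace (PySem.Chars.replace (PySem.Chars.replace code.toList ['\r'] []) ['\n'] []) ['\t'] []
  ((pvBLoop c [] [] 0 none).foldl (fun d seg => d.insert (pvBSeg seg).1 (pvBSeg seg).2) PySem.Dict.empty).items

-- ===== PRECONDITION & SPEC =====
-- On inputs whose code (after removing \r\n\t) starts with ';' and ends with '\\', A's
-- c[i-1] at i = 0 wraps around to the LAST character and treats the leading ';' as
-- backslash-escaped, gluing it into the first segment; B starts a new (empty) segment
-- there since that ';' is not actually preceded by a backslash — the intended semantics.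
def D_parseActList (code : String) : Prop :=
  code.toList.filter (fun ch => ch != '\r' && ch != '\n' && ch != '\t') ≠ [] ∧
  (code.toList.filter (fun ch => ch != '\r' && ch != '\n' && ch != '\t')).head? = some ';' ∧
  (code.toList.filter (fun ch => ch != '\r' && ch != '\n' && ch != '\t')).getLast? = some '\\'
instance (code : String) : Decidable (D_parseActList code) := by unfold D_parseActList; infer_instance

def Spec_parseActList (code : String) (out : List (String × String)) : Prop :=
  ¬ D_parseActList code → out = parseActList_alt code
instance (code : String) (out : List (String × String)) : Decidable (Spec_parseActList code out) := by
  unfold Spec_parseActList; infer_instance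

def pvDiffWitness_parseActList : String := ";\\"
def pvDiffWitnessOut_parseActList : (List (String × String)) × (List (String × String)) :=
  ([(";\\", "")], [("", ""), ("\\", "")])

-- ===== CLAIM (what is proved, stated in full; the proofs are below) =====
def Claim_unchanged_parseActList : Prop :=
  ∀ (code : String), Dom_parseActList code → Spec_parseActList code (parseActList code)
def Claim_changed_parseActList : Prop :=
  Dom_parseActList (pvDiffWitness_parseActList) ∧ D_parseActList (pvDiffWitness_parseActList) ∧
  parseActList (pvDiffWitness_parseActList) = pvDiffWitnessOut_parseActList.1 ∧
  parseActList_alt (pvDiffWitness_parseActList) = pvDiffWitnessOut_parseActList.2 ∧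
  pvDiffWitnessOut_parseActList.1 ≠ pvDiffWitnessOut_parseActList.2
def Claim_exact_parseActList : Prop :=
  ∀ (code : String), Dom_parseActList code → D_parseActList code →
    parseActList code ≠ parseActList_alt code

-- ===== LEMMAS AND PROOFS =====

-- str.replace(old, "") with a single-character old is removal of that character
theorem pv_replace_go_filter (a : Char) :
    ∀ (fuel : Nat) (l acc : List Char), l.length ≤ fuel →
      PySem.Chars.replace.go [a] [] fuel l acc = acc.reverse ++ l.filter (fun c => c != a) := by
  intro fuel
  induction fuel with
  | zero => intro l acc h; simp at h; subst h; simp [PySem.Chars.replace.go]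
  | succ n ih =>
    intro l acc h
    cases l with
    | nil => simp [PySem.Chars.replace.go]
    | cons c t =>
      simp only [PySem.Chars.replace.go, List.isPrefixOf, Bool.and_true]
      by_cases hc : a = c
      · subst hc
        simp only [beq_self_eq_true, if_pos, List.length_cons, List.length_nil, List.drop_succ_cons,
          List.drop_zero, List.reverse_nil, List.nil_append]
        rw [ih t acc (by simpa using h)]
        simp
      · rw [if_neg (by simp [beq_eq_false_iff_ne.mpr hc])]
        rw [ih t (c :: acc) (by simpa using h)]
        simp [Ne.symm hc, bne]
theorem pv_replace_single (s : List Char) (a : Char) :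
    PySem.Chars.replace s [a] [] = s.filter (fun c => c != a) := by
  rw [PySem.Chars.replace]
  simp only [List.isEmpty_cons]
  rw [pv_replace_go_filter a s.length s [] le_rfl]
  simp
theorem pv_count_go_count (a : Char) :
    ∀ (fuel : Nat) (l : List Char) (acc : Nat), l.length ≤ fuel →
      PySem.Chars.count.go [a] fuel l acc = acc + l.count a := by
  intro fuel
  induction fuel with
  | zero => intro l acc h; simp at h; subst h; simp [PySem.Chars.count.go]
  | succ n ih =>
    intro l acc h
    cases l with
    | nil => simp [PySem.Chars.count.go]
    | cons c t =>
      simp only [PySem.Chars.count.go, List.isPrefixOf, Bool.and_true]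
      by_cases hc : a = c
      · subst hc
        simp only [beq_self_eq_true, if_pos, List.length_cons, List.length_nil, List.drop_succ_cons,
          List.drop_zero]
        rw [ih t (acc + 1) (by simpa using h)]
        simp; omega
      · rw [if_neg (by simp [beq_eq_false_iff_ne.mpr hc])]
        rw [ih t acc (by simpa using h)]
        simp [Ne.symm hc]
theorem pv_count_single (s : List Char) (a : Char) : PySem.Chars.count s [a] = s.count a := by
  rw [PySem.Chars.count]
  simp only [List.isEmpty_cons]
  rw [pv_count_go_count a s.length s 0 le_rfl]
  simp
theorem pv_appendLast_concat (segs : List (List Char)) (cur s : List Char) :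
    pvAppendLast (segs ++ [cur]) s = segs ++ [cur ++ s] := by
  simp [pvAppendLast]

-- the main loop invariant: from i ≥ 1 on, A's re-scanning loop equals B's one-pass loop
theorem pv_loop_eq (cs : List Char) :
    ∀ (fuel i : Nat) (segs : List (List Char)) (cur : List Char),
      1 ≤ i → i ≤ cs.length → cs.length - i ≤ fuel →
      pvALoop cs fuel i (segs ++ [cur]) =
        pvBLoop (cs.drop i) cur segs
          (((cs.take i).count '{' : Int) - ((cs.take i).count '}' : Int)) cs[i-1]? := by
  intro fuel
  induction fuel with
  | zero =>
    intro i segs cur h1 h2 h3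
    have hi : i = cs.length := by omega
    subst hi
    simp [pvALoop, List.drop_length, pvBLoop]
  | succ n ih =>
    intro i segs cur h1 h2 h3
    by_cases hlt : i < cs.length
    · have hdrop : cs.drop i = cs[i] :: cs.drop (i + 1) := List.drop_eq_getElem_cons hlt
      have hprev : cs[i-1]? = some (cs[i-1]'(by omega)) := List.getElem?_eq_getElem (by omega)
      have hcur : cs[i]? = some cs[i] := List.getElem?_eq_getElem hlt
      have hget : PySem.List.pyGet? cs ((i : Int) - 1) = cs[i-1]? := by
        rw [show ((i : Int) - 1) = ((i - 1 : Nat) : Int) by omega, PySem.List.pyGet?_natCast]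
      have hslice : PySem.List.slice cs (some 0) (some (i : Int)) = cs.take i := by
        rw [PySem.List.slice_zero_start, PySem.List.slice_to_natCast]
      have htake : cs.take (i + 1) = cs.take i ++ [cs[i]] := List.take_succ_eq_append_getElem hlt
      have hidx : (i + 1) - 1 = i := by omega
      rw [pvALoop, dif_pos hlt, hdrop, pvBLoop]
      by_cases hch : cs[i] = ';'
      · rw [if_pos hch, hget, hprev]
        simp only [hch] at htake hcur
        rw [hch]
        by_cases hesc : cs[i-1]'(by omega) = '\\'
        · -- escaped ';' : both sides append ';' to the current segment
          rw [if_pos (by rw [hesc]), if_neg (by simp [hesc]), pv_appendLast_concat,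
            ih (i + 1) segs (cur ++ [';']) (by omega) (by omega) (by omega)]
          rw [htake, hidx, hcur]
          simp [List.count_append]
        · rw [if_neg (by simp [hesc]), pv_count_single, pv_count_single, hslice]
          by_cases hdep : (cs.take i).count '{' > (cs.take i).count '}'
          · -- inside braces : both sides append ';'
            rw [if_pos hdep, if_neg (by simp [hesc]; omega), pv_appendLast_concat,
              ih (i + 1) segs (cur ++ [';']) (by omega) (by omega) (by omega)]
            rw [htake, hidx, hcur]
            simp [List.count_append]
          · rw [if_neg hdep]
            have hcond : (';' : Char) = ';' ∧ some (cs[i-1]'(by omega)) ≠ some '\\' ∧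
                ((List.count '{' (List.take i cs) : Int) - (List.count '}' (List.take i cs) : Int)) ≤ 0 :=
              ⟨rfl, by simp [hesc], by omega⟩
            by_cases hlast : i < cs.length - 1
            · -- real split point : both sides close the current segment
              rw [if_pos hlast, if_pos hcond,
                if_pos (show List.drop (i+1) cs ≠ [] by simp [List.drop_eq_nil_iff]; omega),
                show (segs ++ [cur]) ++ [[]] = (segs ++ [cur]) ++ [([] : List Char)] from rfl,
                ih (i + 1) (segs ++ [cur]) [] (by omega) (by omega) (by omega)]
              rw [htake, hidx, hcur]
              simp [List.count_append]
            · -- trailing ';' : dropped on both sides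
              rw [if_neg hlast, if_pos hcond,
                if_neg (show ¬ List.drop (i+1) cs ≠ [] by simp [List.drop_eq_nil_iff]; omega),
                ih (i + 1) segs cur (by omega) (by omega) (by omega)]
              rw [htake, hidx, hcur]
              simp [List.count_append]
      · -- ordinary character : appended, depth updated
        rw [if_neg hch, if_neg (by simp [hch]), pv_appendLast_concat,
          ih (i + 1) segs (cur ++ [cs[i]]) (by omega) (by omega) (by omega), hidx, hcur, htake]
        congr 1
        by_cases hob : cs[i] = '{'
        · simp [hob, List.count_append]; omega
        · by_cases hcb : cs[i] = '}'
          · simp [hcb, List.count_append]; omega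
          · rw [if_neg hob, if_neg hcb, List.count_append, List.count_append,
              show List.count '{' [cs[i]] = 0 by simp [hob],
              show List.count '}' [cs[i]] = 0 by simp [hcb]]
            omega
    · have hi : i = cs.length := by omega
      subst hi
      rw [pvALoop, dif_neg hlt]
      simp [List.drop_length, pvBLoop]

theorem pv_part_notmem (s : List Char) (h : ' ' ∉ s) : pvPartitionSp s = (s, [], []) := by
  induction s with
  | nil => rfl
  | cons c t ih =>
    have hc : ¬ c = ' ' := fun hc => h (by simp [hc])
    simp [pvPartitionSp, hc, ih (fun hm => h (by simp [hm]))]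

theorem pv_part_found :
    ∀ (s : List Char) (j : Nat), (hj : j < s.length) → s[j] = ' ' →
      (∀ i (hi : i < j), s[i]'(by omega) ≠ ' ') →
      pvPartitionSp s = (s.take j, [' '], s.drop (j + 1)) := by
  intro s
  induction s with
  | nil => intro j hj; simp at hj
  | cons c t ih =>
    intro j hj hsp hmin
    cases j with
    | zero => simp_all [pvPartitionSp]
    | succ k =>
      have hc : ¬ c = ' ' := by
        have := hmin 0 (by omega)
        simpa using this
      have ht := ih k (by simpa using hj) (by simpa using hsp)
        (fun i hik => by have := hmin (i + 1) (by omega); simpa using this)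
      simp [pvPartitionSp, hc, ht]

theorem pv_singleton_prefix (a : Char) (l : List Char) : [a] <+: l ↔ l.head? = some a := by
  cases l <;> simp [List.cons_prefix_iff]

theorem pv_seg_eq (d : PySem.Dict String String) (x : List Char) :
    pvASeg d x = d.insert (pvBSeg x).1 (pvBSeg x).2 := by
  simp only [pvASeg, pvBSeg]
  by_cases hmem : ' ' ∈ x.dropWhile (fun ch => ch == ' ' || ch == '\t')
  · -- a space separates key and value
    have hpos : 0 ≤ PySem.Chars.find (x.dropWhile (fun ch => ch == ' ' || ch == '\t')) [' '] :=
      (PySem.Chars.find_nonneg_iff _ _).mpr ((List.singleton_infix_iff _ _).mpr hmem)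
    obtain ⟨hpre, hmin⟩ := PySem.Chars.find_spec (s := x.dropWhile (fun ch => ch == ' ' || ch == '\t'))
      (sub := [' ']) hpos
    set s := x.dropWhile (fun ch => ch == ' ' || ch == '\t') with hs
    set j := (PySem.Chars.find s [' ']).toNat with hj
    have hget : s[j]? = some ' ' := by
      rw [← List.head?_drop]
      exact (pv_singleton_prefix ' ' (s.drop j)).mp hpre
    have hjlt : j < s.length := (List.getElem?_eq_some_iff.mp hget).1
    have hsp : s[j]'hjlt = ' ' := (List.getElem?_eq_some_iff.mp hget).2
    have hminel : ∀ i, (hik : i < j) → s[i]'(by omega) ≠ ' ' := by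
      intro i hik hcontra
      exact hmin i hik ((pv_singleton_prefix ' ' (s.drop i)).mpr
        (by rw [List.head?_drop, List.getElem?_eq_getElem (by omega), hcontra]))
    have hslice1 : PySem.List.slice s none (some (PySem.Chars.find s [' '])) = s.take j :=
      PySem.List.slice_to s hpos
    have hslice2 : PySem.List.slice s (some (PySem.Chars.find s [' '] + 1)) none = s.drop (j + 1) := by
      rw [PySem.List.slice_from s (add_nonneg hpos zero_le_one),
        show (PySem.Chars.find s [' '] + 1).toNat = j + 1 by omega]
    have hflt : ¬ (PySem.Chars.find s [' '] < 0) := by omega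
    rw [pv_part_found s j hjlt hsp hminel, if_neg hflt, hslice1, hslice2]
    dsimp only
    split_ifs <;> rfl
  · have hfind : PySem.Chars.find (x.dropWhile (fun ch => ch == ' ' || ch == '\t')) [' '] = -1 :=
      (PySem.Chars.find_eq_neg_one_iff _ _).mpr
        (fun hin => hmem ((List.singleton_infix_iff _ _).mp hin))
    rw [pv_part_notmem _ hmem, hfind]
    norm_num [show PySem.Chars.startswith ([] : List Char) ['{'] = false from by decide]

-- ===== VERDICT (by name: the statement is the Claim_ definition above) =====
theorem pv_filter_chain (code : String) :
    code.toList.filter (fun ch => ch != '\r' && ch != '\n' && ch != '\t') =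
      PySem.Chars.replace (PySem.Chars.replace (PySem.Chars.replace code.toList ['\r'] []) ['\n'] []) ['\t'] [] := by
  rw [pv_replace_single, pv_replace_single, pv_replace_single, List.filter_filter, List.filter_filter]
  exact List.filter_congr (fun a _ => by simp [Bool.and_assoc, Bool.and_comm])

theorem pv_fold_eq (segs : List (List Char)) (d : PySem.Dict String String) :
    segs.foldl pvASeg d = segs.foldl (fun d seg => d.insert (pvBSeg seg).1 (pvBSeg seg).2) d := by
  induction segs generalizing d with
  | nil => rfl
  | cons x t ih => simp only [List.foldl_cons, pv_seg_eq, ih]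

-- ---- tightness: inside D_ the two results differ everywhere ----

theorem pv_aloop_head (cs : List Char) :
    ∀ (fuel i : Nat) (l : List (List Char)) (t : List Char), l.head? = some (';' :: t) →
      ∃ t', (pvALoop cs fuel i l).head? = some (';' :: t') := by
  intro fuel
  induction fuel with
  | zero => intro i l t h; exact ⟨t, h⟩
  | succ n ih =>
    intro i l t h
    rcases l with _ | ⟨a, l2⟩
    · simp at h
    · have ha : a = ';' :: t := by simpa using h
      subst ha
      rw [pvALoop]
      by_cases hlt : i < cs.length
      · rw [dif_pos hlt]
        have hstep : ∀ s : List Char, ∃ u, (pvAppendLast ((';' :: t) :: l2) s).head? = some (';' :: u) := by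
          intro s
          rcases l2 with _ | ⟨b, l3⟩
          · exact ⟨t ++ s, by simp [pvAppendLast]⟩
          · exact ⟨t, by simp [pvAppendLast]⟩
        split_ifs with h1 h2 h3 h4
        · obtain ⟨u, hu⟩ := hstep [';']; exact ih (i + 1) _ u hu
        · obtain ⟨u, hu⟩ := hstep [';']; exact ih (i + 1) _ u hu
        · exact ih (i + 1) _ t (by simp)
        · exact ih (i + 1) _ t (by simp)
        · obtain ⟨u, hu⟩ := hstep [cs[i]]; exact ih (i + 1) _ u hu
      · rw [dif_neg hlt]; exact ⟨t, by simp⟩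

theorem pv_bloop_head :
    ∀ (rest cur : List Char) (segs : List (List Char)) (depth : Int) (prev : Option Char)
      (x : List Char), segs.head? = some x →
      (pvBLoop rest cur segs depth prev).head? = some x := by
  intro rest
  induction rest with
  | nil => intro cur segs depth prev x h; rcases segs with _ | ⟨a, t⟩ <;> simp_all [pvBLoop]
  | cons ch rs ih =>
    intro cur segs depth prev x h
    rw [pvBLoop]
    split_ifs with h1 h2
    all_goals first
      | exact ih _ _ _ _ x h
      | · refine ih _ _ _ _ x ?_
          rcases segs with _ | ⟨a, t2⟩
          · simp at h
          · simpa using h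

theorem pv_insert_head_key (d : PySem.Dict String String) (p : String × String) (k v : String)
    (h : d.items.head? = some p) :
    ∃ w, ((d.insert k v).items).head? = some (p.1, w) := by
  rcases d with ⟨items⟩
  rcases items with _ | ⟨q, t⟩
  · simp at h
  · have hq : q = p := by simpa [PySem.Dict.items] using h
    subst hq
    simp only [PySem.Dict.insert]
    split_ifs with hcond
    · by_cases hk : q.1 = k
      · exact ⟨v, by simp [hk]⟩
      · exact ⟨q.2, by simp [hk]⟩
    · exact ⟨q.2, by simp⟩

theorem pv_fold_head_key :
    ∀ (segs : List (List Char)) (d : PySem.Dict String String) (p : String × String),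
      d.items.head? = some p →
      ∃ w, (((segs.foldl (fun d seg => d.insert (pvBSeg seg).1 (pvBSeg seg).2) d)).items).head? =
        some (p.1, w) := by
  intro segs
  induction segs with
  | nil => intro d p h; exact ⟨p.2, by simpa using h⟩
  | cons x t ih =>
    intro d p h
    obtain ⟨w, hw⟩ := pv_insert_head_key d p (pvBSeg x).1 (pvBSeg x).2 h
    simpa using ih _ (p.1, w) hw

theorem pv_bseg_semi_key (t : List Char) : ∃ u, ((pvBSeg (';' :: t)).1).toList = ';' :: u := by
  simp only [pvBSeg]
  rw [List.dropWhile_cons_of_neg (by decide)]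
  by_cases hfind : PySem.Chars.find (';' :: t) [' '] < 0
  · rw [if_pos hfind]
    exact ⟨t, by rw [List.dropWhile_cons_of_neg (by decide)]; simp⟩
  · rw [if_neg hfind]
    have hpos : 0 ≤ PySem.Chars.find (';' :: t) [' '] := by omega
    obtain ⟨hpre, hmin⟩ := PySem.Chars.find_spec (s := ';' :: t) (sub := [' ']) hpos
    have hj1 : 1 ≤ (PySem.Chars.find (';' :: t) [' ']).toNat := by
      by_contra hj0
      have h0 : (PySem.Chars.find (';' :: t) [' ']).toNat = 0 := by omega
      rw [h0, List.drop_zero] at hpre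
      have := (pv_singleton_prefix ' ' (';' :: t)).mp hpre
      simp at this
    rw [PySem.List.slice_to _ hpos]
    obtain ⟨k, hk⟩ : ∃ k, (PySem.Chars.find (';' :: t) [' ']).toNat = k + 1 :=
      ⟨(PySem.Chars.find (';' :: t) [' ']).toNat - 1, by omega⟩
    rw [hk, List.take_succ_cons, List.dropWhile_cons_of_neg (by decide)]
    exact ⟨t.take k, by simp⟩

theorem parseActList_spec : Claim_unchanged_parseActList := by
  unfold Claim_unchanged_parseActList Spec_parseActList
  intro code _hdom hnd
  simp only [parseActList, parseActList_alt]
  rw [pv_fold_eq]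
  set cs := PySem.Chars.replace (PySem.Chars.replace (PySem.Chars.replace code.toList ['\r'] []) ['\n'] []) ['\t'] [] with hcs
  have hfilter : code.toList.filter (fun ch => ch != '\r' && ch != '\n' && ch != '\t') = cs := by
    rw [hcs]; exact pv_filter_chain code
  suffices h : pvALoop cs cs.length 0 [[]] = pvBLoop cs [] [] 0 none by rw [h]
  cases hc : cs with
  | nil => rfl
  | cons ch rs =>
    have hfilter' := hfilter.trans hc
    rw [show (ch :: rs).length = rs.length + 1 from rfl, pvALoop,
      dif_pos (show 0 < (ch :: rs).length by simp), List.getElem_cons_zero]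
    by_cases hch : ch = ';'
    · -- the quirky i = 0 step: A consults cs[-1]; ¬ D_ rules out a trailing backslash
      have hlast : (ch :: rs).getLast? ≠ some '\\' := fun hl => hnd (by
        unfold D_parseActList
        rw [hfilter']
        exact ⟨by simp, by simp [hch], hl⟩)
      have hesc : ¬ (PySem.List.pyGet? (ch :: rs) (((0 : Nat) : Int) - 1) = some '\\') := by
        rw [show (((0 : Nat) : Int) - 1) = (-1 : Int) by simp, PySem.List.pyGet?_neg_one]
        exact hlast
      rw [if_pos hch, if_neg hesc]
      have hcnt : ¬ (PySem.Chars.count (PySem.List.slice (ch :: rs) (some 0) (some ((0 : Nat) : Int))) ['{'] >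
          PySem.Chars.count (PySem.List.slice (ch :: rs) (some 0) (some ((0 : Nat) : Int))) ['}']) := by
        rw [PySem.List.slice_zero_start, PySem.List.slice_to_natCast, List.take_zero]
        decide
      rw [if_neg hcnt]
      by_cases hrs : rs = []
      · subst hrs
        rw [if_neg (by simp), hch]
        rfl
      · rw [if_pos (by simp [List.length_pos_iff.mpr hrs])]
        rw [show ([[]] ++ [[]] : List (List Char)) = ([[]] : List (List Char)) ++ [([] : List Char)] from rfl,
          pv_loop_eq (ch :: rs) rs.length 1 [[]] [] (by omega) (by simp) (by simp),
          show (ch :: rs).take 1 = [ch] from rfl, show (ch :: rs).drop 1 = rs from rfl,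
          show (ch :: rs)[0]? = some ch from rfl, pvBLoop, if_pos ⟨hch, by simp, by simp⟩,
          if_pos hrs, hch]
        simp
    · rw [if_neg hch, show pvAppendLast [[]] [ch] = [] ++ [[ch]] from rfl,
        pv_loop_eq (ch :: rs) rs.length 1 [] [ch] (by omega) (by simp) (by simp),
        show (ch :: rs).take 1 = [ch] from rfl, show (ch :: rs).drop 1 = rs from rfl,
        show (ch :: rs)[0]? = some ch from rfl, pvBLoop, if_neg (by simp [hch])]
      by_cases hob : ch = '{'
      · simp [hob]
      · by_cases hcb : ch = '}'
        · simp [hcb]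
        · simp [hob, hcb]

theorem parseActList_changed : Claim_changed_parseActList := by
  unfold Claim_changed_parseActList; decide

theorem parseActList_tight : Claim_exact_parseActList := by
  unfold Claim_exact_parseActList D_parseActList
  intro code _hdom hd
  obtain ⟨hne0, hhead, hlast⟩ := hd
  rw [pv_filter_chain code] at hne0 hhead hlast
  simp only [parseActList, parseActList_alt]
  rw [pv_fold_eq]
  cases hc : (PySem.Chars.replace (PySem.Chars.replace (PySem.Chars.replace code.toList ['\r'] []) ['\n'] []) ['\t'] []) with
  | nil => rw [hc] at hne0; exact absurd rfl hne0
  | cons ch rs =>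
    rw [hc] at hhead hlast
    have hch : ch = ';' := by simpa using hhead
    subst hch
    have hrs : rs ≠ [] := by
      intro h
      subst h
      simp at hlast
    rw [show (';' :: rs).length = rs.length + 1 from rfl, pvALoop,
      dif_pos (show 0 < (';' :: rs).length by simp), List.getElem_cons_zero, if_pos rfl,
      if_pos (show PySem.List.pyGet? (';' :: rs) (((0 : Nat) : Int) - 1) = some '\\' by
        rw [show (((0 : Nat) : Int) - 1) = (-1 : Int) by simp, PySem.List.pyGet?_neg_one]
        exact hlast),
      pvBLoop, if_pos ⟨rfl, by simp, le_refl (0 : Int)⟩, if_pos hrs, List.nil_append]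
    obtain ⟨t', hA⟩ := pv_aloop_head (';' :: rs) rs.length 1 (pvAppendLast [[]] [';']) [] rfl
    have hB := pv_bloop_head rs [] [[]] 0 (some ';') [] rfl
    rcases hsegA : pvALoop (';' :: rs) rs.length 1 (pvAppendLast [[]] [';']) with _ | ⟨segA0, restA⟩
    · rw [hsegA] at hA; simp at hA
    · rw [hsegA] at hA
      have hA0 : segA0 = ';' :: t' := by simpa using hA
      subst hA0
      rcases hsegB : pvBLoop rs [] [[]] 0 (some ';') with _ | ⟨segB0, restB⟩
      · rw [hsegB] at hB; simp at hB
      · rw [hsegB] at hB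
        have hB0 : segB0 = [] := by simpa using hB
        subst hB0
        rw [List.foldl_cons, List.foldl_cons]
        obtain ⟨wA, hitemsA⟩ := pv_fold_head_key restA
          (PySem.Dict.empty.insert (pvBSeg (';' :: t')).1 (pvBSeg (';' :: t')).2)
          ((pvBSeg (';' :: t')).1, (pvBSeg (';' :: t')).2) rfl
        obtain ⟨wB, hitemsB⟩ := pv_fold_head_key restB
          (PySem.Dict.empty.insert (pvBSeg []).1 (pvBSeg []).2)
          ((pvBSeg []).1, (pvBSeg []).2) rfl
        intro heq
        rw [heq, hitemsB] at hitemsA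
        have hkeys : (pvBSeg ([] : List Char)).1 = (pvBSeg (';' :: t')).1 := by
          have h2 := Option.some.inj hitemsA
          simpa using congrArg Prod.fst h2
        obtain ⟨u, hu⟩ := pv_bseg_semi_key t'
        rw [← hkeys] at hu
        have : (pvBSeg ([] : List Char)).1 = "" := by decide
        rw [this] at hu
        simp at hu
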